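-- pv_equiv track=rewrite | github.com/taidao1901/StandardScraper | Pattern/Get_Data_Fi_2.py | remove_after
-- ===== SOURCE A (Python) =====
-- def remove_after(string, remove_char):
--     kq=''
--     for i in string:
--         if i!= remove_char:
--             kq+=i
--         else:
--             break
--             return kq
--     return kq
-- ===== SOURCE B (Python) =====
-- def remove_after(string, remove_char):
--     idx = next((i for i, c in enumerate(string) if c == remove_char), len(string))
--     return string[:idx]
-- ===== Notes on version B (the rewrite author's own statement) =====
-- stated objective: simpler
-- what changed: B locates the cut index with enumerate/next and slices once, instead of A's character-by-character string concatenation with break.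
import Mathlib
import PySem

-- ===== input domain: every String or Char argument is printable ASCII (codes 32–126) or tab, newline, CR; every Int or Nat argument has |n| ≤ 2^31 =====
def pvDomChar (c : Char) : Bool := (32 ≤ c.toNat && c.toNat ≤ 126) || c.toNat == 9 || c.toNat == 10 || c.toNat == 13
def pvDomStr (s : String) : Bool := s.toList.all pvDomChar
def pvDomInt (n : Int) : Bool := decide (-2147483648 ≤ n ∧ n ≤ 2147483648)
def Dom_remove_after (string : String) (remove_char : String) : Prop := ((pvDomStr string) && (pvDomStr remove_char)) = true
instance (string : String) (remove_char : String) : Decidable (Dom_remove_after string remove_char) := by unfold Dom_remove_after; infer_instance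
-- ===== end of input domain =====

-- B finds the cut index first and slices once, instead of A's accumulate-and-break loop; same return value.
-- ===== PORT A =====
-- A's loop: kq='' ; for i in string: if i != remove_char: kq += i else: break ; return kq
def raGoA (remove_char : String) : List Char → List Char → List Char
  | acc, [] => acc
  | acc, c :: rest =>
    if String.mk [c] ≠ remove_char then raGoA remove_char (acc ++ [c]) rest
    else acc

def remove_after (string : String) (remove_char : String) : String :=
  String.mk (raGoA remove_char [] string.toList)

-- ===== PORT B =====
-- idx = next((i for i,c in enumerate(string) if c == remove_char), len(string)); return string[:idx]
def remove_after_alt (string : String) (remove_char : String) : String :=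
  String.mk (string.toList.take
    (string.toList.findIdx (fun c => String.mk [c] == remove_char)))

-- ===== PRECONDITION & SPEC =====
def Spec_remove_after (string : String) (remove_char : String) (out : String) : Prop := out = remove_after_alt string remove_char
instance (string : String) (remove_char : String) (out : String) : Decidable (Spec_remove_after string remove_char out) := by unfold Spec_remove_after; infer_instance

-- ===== CLAIM (what is proved, stated in full; the proofs are below) =====
def Claim_equal_remove_after : Prop := ∀ (string : String) (remove_char : String), Dom_remove_after string remove_char → Spec_remove_after string remove_char (remove_after string remove_char)

-- ===== LEMMAS AND PROOFS =====

lemma raGoA_eq (remove_char : String) (l acc : List Char) :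
    raGoA remove_char acc l = acc ++ l.take (l.findIdx (fun c => String.mk [c] == remove_char)) := by
  induction l generalizing acc with
  | nil => simp [raGoA]
  | cons c rest ih =>
    by_cases h : String.mk [c] = remove_char
    · simp [raGoA, h, List.findIdx_cons]
    · have hb : (String.mk [c] == remove_char) = false := beq_eq_false_iff_ne.mpr h
      simp [raGoA, h, List.findIdx_cons, ih, hb, List.take_succ_cons]

-- ===== VERDICT (by name: the statement is the Claim_ definition above) =====
theorem remove_after_spec : Claim_equal_remove_after := by
  intro s r _
  unfold Spec_remove_after remove_after remove_after_alt
  rw [raGoA_eq]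
  simp
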